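-- pv_equiv track=rewrite | github.com/Javitronxo/AdventOfCode | 2015/day_3.py | deliver_gifts
-- ===== SOURCE A (Python) =====
-- from collections import defaultdict
--
-- def deliver_gifts(instructions: str) -> dict:
--     current_position = [0, 0]
--     gifts_delivered = defaultdict(int)
--     gifts_delivered[(0, 0)] = 1
--     for direction in instructions:
--         if direction == '^':
--             current_position[0] += 1
--         elif direction == 'v':
--             current_position[0] -= 1
--         if direction == '>':
--             current_position[1] += 1
--         if direction == '<':
--             current_position[1] -= 1
--         gifts_delivered[tuple(current_position)] += 1
--     return gifts_delivered
-- ===== SOURCE B (Python) =====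
-- from collections import defaultdict
--
-- def deliver_gifts(instructions: str) -> dict:
--     # pass 1: the list of visited positions (prefix sums of the per-char moves)
--     deltas = {'^': (1, 0), 'v': (-1, 0), '>': (0, 1), '<': (0, -1)}
--     x = y = 0
--     path = [(0, 0)]
--     for ch in instructions:
--         dx, dy = deltas.get(ch, (0, 0))
--         x += dx
--         y += dy
--         path.append((x, y))
--     # pass 2: count by sorting — equal positions become adjacent, one run-length scan
--     ordered = sorted(path)
--     counts = {}
--     run = 0
--     for i, p in enumerate(ordered):
--         run += 1
--         if i + 1 == len(ordered) or ordered[i + 1] != p: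
--             counts[p] = run
--             run = 0
--     # pass 3: emit in first-visit order (the insertion order of A's dict)
--     gifts = defaultdict(int)
--     for p in dict.fromkeys(path):
--         gifts[p] = counts[p]  # p is always a key of counts (p is in path)
--     return gifts
-- ===== Notes on version B (the rewrite author's own statement) =====
-- stated objective: alternative
-- what changed: A counts incrementally by bumping a dict entry at every step of the walk; B instead builds the visited-position list, counts by sorting it and run-length scanning the adjacent equal runs, and finally emits the counts in first-visit order.
import Mathlib
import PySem

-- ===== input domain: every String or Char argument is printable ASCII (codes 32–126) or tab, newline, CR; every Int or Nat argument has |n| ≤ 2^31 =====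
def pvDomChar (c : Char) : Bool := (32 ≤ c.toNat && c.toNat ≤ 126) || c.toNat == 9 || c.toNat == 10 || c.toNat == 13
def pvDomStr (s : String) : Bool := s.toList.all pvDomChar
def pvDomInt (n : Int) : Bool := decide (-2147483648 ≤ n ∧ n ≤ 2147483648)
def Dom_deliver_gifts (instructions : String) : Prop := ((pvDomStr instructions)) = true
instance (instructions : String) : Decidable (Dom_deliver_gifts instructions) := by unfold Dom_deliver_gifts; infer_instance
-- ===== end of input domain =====

-- B counts by sorting the visited positions and run-length scanning, instead of A's incremental dict tally (alternative algorithm, not faster).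

-- ===== PORT A =====
-- one loop iteration of A: update the mutable position by the if/elif chain, then bump the dict
def giftsStepA (s : (Int × Int) × PySem.Dict (Int × Int) Int) (c : Char) :
    (Int × Int) × PySem.Dict (Int × Int) Int :=
  let x := if c = '^' then s.1.1 + 1 else if c = 'v' then s.1.1 - 1 else s.1.1
  let y := if c = '>' then s.1.2 + 1 else s.1.2
  let y := if c = '<' then y - 1 else y
  ((x, y), s.2.insert (x, y) (s.2.getD (x, y) 0 + 1))

def deliver_gifts (instructions : String) : List (Int × Int × Int) :=
  let init : PySem.Dict (Int × Int) Int := PySem.Dict.empty.insert (0, 0) 1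
  let fin := instructions.toList.foldl giftsStepA ((0, 0), init)
  fin.2.items.map (fun p => (p.1.1, p.1.2, p.2))

-- ===== PORT B =====
-- deltas.get(ch, (0, 0))
def giftsDelta (c : Char) : Int × Int :=
  (PySem.Dict.ofList [('^', ((1 : Int), (0 : Int))), ('v', (-1, 0)), ('>', (0, 1)), ('<', (0, -1))]).getD c (0, 0)

-- pass 1 of B: the positions appended by the loop (the running (x, y) after each char)
def giftsPath : List Char → Int × Int → List (Int × Int)
  | [], _ => []
  | c :: cs, p =>
      let q := (p.1 + (giftsDelta c).1, p.2 + (giftsDelta c).2)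
      q :: giftsPath cs q

-- pass 2 of B: the run-length scan over the sorted list ('run += 1; if last or next != p: counts[p] = run; run = 0')
def giftsRuns : List (Int × Int) → Int → PySem.Dict (Int × Int) Int → PySem.Dict (Int × Int) Int
  | [], _, counts => counts
  | [p], run, counts => counts.insert p (run + 1)
  | p :: q :: rest, run, counts =>
      if q ≠ p then giftsRuns (q :: rest) 0 (counts.insert p (run + 1))
      else giftsRuns (q :: rest) (run + 1) counts

def deliver_gifts_alt (instructions : String) : List (Int × Int × Int) :=
  let path := ((0 : Int), (0 : Int)) :: giftsPath instructions.toList (0, 0)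
  -- sorted(path): Python compares the pairs lexicographically
  let ordered := PySem.List.sorted2 path (fun p => p.1) (fun p => p.2)
  let counts := giftsRuns ordered 0 PySem.Dict.empty
  -- pass 3 of B: for p in dict.fromkeys(path): gifts[p] = counts[p]
  -- (counts[p]: every p of path is a key of counts, so no KeyError; getD's default is unreachable)
  let gifts := (PySem.List.dedup path).foldl
    (fun d p => d.insert p (counts.getD p 0)) (PySem.Dict.empty : PySem.Dict (Int × Int) Int)
  gifts.items.map (fun p => (p.1.1, p.1.2, p.2))

-- ===== PRECONDITION & SPEC =====
def Spec_deliver_gifts (instructions : String) (out : List (Int × Int × Int)) : Prop := out = deliver_gifts_alt instructions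
instance (instructions : String) (out : List (Int × Int × Int)) : Decidable (Spec_deliver_gifts instructions out) := by unfold Spec_deliver_gifts; infer_instance

-- ===== CLAIM (what is proved, stated in full; the proofs are below) =====
def Claim_equal_deliver_gifts : Prop := ∀ (instructions : String), Dom_deliver_gifts instructions → Spec_deliver_gifts instructions (deliver_gifts instructions)

-- ===== LEMMAS AND PROOFS =====

-- the lexicographic order Python's tuple '<' induces on pairs of ints
def lexle (a b : Int × Int) : Prop := a.1 < b.1 ∨ (a.1 = b.1 ∧ a.2 ≤ b.2)

-- the comparison sorted2 path (·.1) (·.2) uses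
def bfun (a b : Int × Int) : Bool :=
  decide (a.1 < b.1) || (!decide (b.1 < a.1) && decide (a.2 < b.2))

lemma lexle_of_bfun_true (a b : Int × Int) (h : bfun a b = true) : lexle a b := by
  simp [bfun] at h; unfold lexle; omega

lemma lexle_of_bfun_false (a b : Int × Int) (h : bfun a b = false) : lexle b a := by
  simp [bfun] at h; unfold lexle; omega

lemma lexle_trans (a b c : Int × Int) (h1 : lexle a b) (h2 : lexle b c) : lexle a c := by
  unfold lexle at *; omega

lemma lexle_antisymm (a b : Int × Int) (h1 : lexle a b) (h2 : lexle b a) : a = b := by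
  unfold lexle at *
  obtain ⟨a1, a2⟩ := a; obtain ⟨b1, b2⟩ := b
  simp_all; omega

lemma pairwise_insertBy (x : Int × Int) (l : List (Int × Int)) (hl : l.Pairwise lexle) :
    (PySem.List.insertBy bfun x l).Pairwise lexle := by
  induction l with
  | nil => simp [PySem.List.insertBy]
  | cons y ys ih =>
      rw [List.pairwise_cons] at hl
      by_cases h : bfun x y = true
      · rw [show PySem.List.insertBy bfun x (y :: ys) = x :: y :: ys from by
          simp [PySem.List.insertBy, h]]
        rw [List.pairwise_cons]
        constructor
        · intro z hz
          rcases List.mem_cons.mp hz with rfl | hz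
          · exact lexle_of_bfun_true x z h
          · exact lexle_trans x y z (lexle_of_bfun_true x y h) (hl.1 z hz)
        · exact List.pairwise_cons.mpr hl
      · rw [show PySem.List.insertBy bfun x (y :: ys) = y :: PySem.List.insertBy bfun x ys from by
          simp [PySem.List.insertBy, h]]
        rw [List.pairwise_cons]
        refine ⟨?_, ih hl.2⟩
        intro z hz
        rcases (PySem.List.mem_insertBy bfun x z ys).mp hz with rfl | hz
        · exact lexle_of_bfun_false z y (by simpa using h)
        · exact hl.1 z hz

lemma pairwise_sorted2 (xs : List (Int × Int)) :
    (PySem.List.sorted2 xs (fun p => p.1) (fun p => p.2)).Pairwise lexle := by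
  show (xs.foldl (fun acc x => PySem.List.insertBy bfun x acc) []).Pairwise lexle
  have aux : ∀ (l : List (Int × Int)) (acc : List (Int × Int)), acc.Pairwise lexle →
      (l.foldl (fun acc x => PySem.List.insertBy bfun x acc) acc).Pairwise lexle := by
    intro l
    induction l with
    | nil => intro acc h; simpa using h
    | cons b bs ihb => intro acc h; exact ihb _ (pairwise_insertBy b acc h)
  exact aux xs [] (by simp)

lemma not_mem_of_lexle_ne (p q : Int × Int) (rs : List (Int × Int))
    (hpq : lexle p q) (hq : (q :: rs).Pairwise lexle) (hne : p ≠ q) : p ∉ q :: rs := by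
  intro hm
  rcases List.mem_cons.mp hm with rfl | hm
  · exact hne rfl
  · rw [List.pairwise_cons] at hq
    exact hne (lexle_antisymm p q hpq (hq.1 p hm))

-- the run-length scan over a lexicographically sorted list computes every element's count
lemma giftsRuns_getD (rest : List (Int × Int)) :
    ∀ (p : Int × Int) (run : Int) (d : PySem.Dict (Int × Int) Int) (v : Int × Int),
    (p :: rest).Pairwise lexle →
    (giftsRuns (p :: rest) run d).getD v 0 =
      if v ∈ p :: rest then (if v = p then run else 0) + ((p :: rest).count v : Int)
      else d.getD v 0 := by
  induction rest with
  | nil =>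
      intro p run d v _
      simp only [giftsRuns, PySem.Dict.getD_insert, List.mem_singleton, List.count_singleton]
      by_cases h : v = p <;> simp [h]
  | cons q rs ih =>
      intro p run d v hpw
      have hpw' : (q :: rs).Pairwise lexle := (List.pairwise_cons.mp hpw).2
      have hlpq : lexle p q := (List.pairwise_cons.mp hpw).1 q (by simp)
      by_cases hqp : q = p
      · subst hqp
        simp only [giftsRuns]
        rw [if_neg (show ¬ q ≠ q by simp)]
        rw [ih q (run + 1) d v hpw']
        by_cases hv : v ∈ q :: rs
        · have : v ∈ q :: q :: rs := by simp_all
          rw [if_pos hv, if_pos this]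
          by_cases hvq : v = q
          · subst hvq
            simp only [List.count_cons_self]
            push_cast
            ring
          · have hcc : List.count v (q :: q :: rs) = List.count v (q :: rs) := by
              simp [Ne.symm hvq]
            rw [hcc]
            simp [hvq]
        · have hv2 : ¬ v ∈ q :: q :: rs := by simp_all
          rw [if_neg hv, if_neg hv2]
      · simp only [giftsRuns]
        rw [if_pos (show q ≠ p from hqp)]
        rw [ih q 0 (d.insert p (run + 1)) v hpw']
        have hpnot : p ∉ q :: rs := not_mem_of_lexle_ne p q rs hlpq hpw' (fun h => hqp h.symm)
        by_cases hv : v ∈ q :: rs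
        · have hvp : v ≠ p := fun h => hpnot (h ▸ hv)
          have : v ∈ p :: q :: rs := by simp [hv]
          rw [if_pos hv, if_pos this]
          simp [hvp, List.count_cons, Ne.symm hvp]
        · rw [if_neg hv, PySem.Dict.getD_insert]
          by_cases hvp : v = p
          · subst hvp
            have : v ∈ v :: q :: rs := by simp
            rw [if_pos rfl, if_pos this]
            have hc : (q :: rs).count v = 0 := List.count_eq_zero.mpr hv
            simp [hc]
          · rw [if_neg hvp, if_neg (by simp [hvp, hv])]

-- A's loop is the Counter fold over the visited path
lemma giftsStepA_eq (c : Char) (p : Int × Int) (d : PySem.Dict (Int × Int) Int) :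
    giftsStepA (p, d) c =
      ((p.1 + (giftsDelta c).1, p.2 + (giftsDelta c).2),
       d.modify (p.1 + (giftsDelta c).1, p.2 + (giftsDelta c).2) 0 (· + 1)) := by
  have hd : giftsDelta c = if c = '^' then (1, 0) else if c = 'v' then (-1, 0)
      else if c = '>' then (0, 1) else if c = '<' then (0, -1) else (0, 0) := by
    split_ifs with h1 h2 h3 h4 <;> first
      | (subst_vars; decide)
      | simp [giftsDelta, PySem.Dict.ofList, PySem.Dict.update, PySem.Dict.getD_insert,
          h1, h2, h3, h4]
  show giftsStepA (p, d) c = (_, d.insert _ (d.getD _ 0 + 1))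
  simp only [giftsStepA, hd]
  split_ifs <;> simp_all [sub_eq_add_neg]

lemma foldl_stepA_eq_counterfold (cs : List Char) (p : Int × Int) (d : PySem.Dict (Int × Int) Int) :
    (cs.foldl giftsStepA (p, d)).2 =
      (giftsPath cs p).foldl (fun d q => d.modify q 0 (· + 1)) d := by
  induction cs generalizing p d with
  | nil => rfl
  | cons c cs ih =>
      simp only [List.foldl_cons, giftsPath, giftsStepA_eq]
      exact ih _ _

lemma dictA_eq_counter (cs : List Char) :
    (cs.foldl giftsStepA ((0, 0), PySem.Dict.empty.insert (0, 0) 1)).2 =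
      PySem.Dict.counter (((0 : Int), (0 : Int)) :: giftsPath cs (0, 0)) := by
  rw [PySem.Dict.counter_eq_foldl, List.foldl_cons, foldl_stepA_eq_counterfold]
  congr 1


theorem deliver_gifts_spec : Claim_equal_deliver_gifts := by
  intro s _
  show deliver_gifts s = deliver_gifts_alt s
  unfold deliver_gifts deliver_gifts_alt
  simp only [dictA_eq_counter, PySem.Dict.items_counter]
  set path := ((0 : Int), (0 : Int)) :: giftsPath s.toList (0, 0) with hpath
  set ordered := PySem.List.sorted2 path (fun p => p.1) (fun p => p.2) with hord
  set counts := giftsRuns ordered 0 PySem.Dict.empty with hcounts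
  have hfresh : ∀ a ∈ PySem.List.dedup path,
      (PySem.Dict.empty : PySem.Dict (Int × Int) Int).contains a = false := by
    intro a _; simp [PySem.Dict.contains_empty]
  have hnodup : ((PySem.List.dedup path).map id).Nodup := by
    rw [List.map_id]
    exact PySem.List.nodup_dedup path
  have hitems := PySem.Dict.items_foldl_insert_fresh (PySem.List.dedup path) id
    (fun p => counts.getD p 0) PySem.Dict.empty hfresh hnodup
  simp only [id] at hitems
  rw [hitems]
  have hie : (PySem.Dict.empty : PySem.Dict (Int × Int) Int).items = [] := rfl
  simp only [hie, List.nil_append, PySem.List.dedup_eq_ofList, List.map_map]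
  apply List.map_congr_left
  intro p hp
  have hmem : p ∈ path := by simpa [PySem.Set.mem_ofList] using hp
  have hmemord : p ∈ ordered := ((PySem.List.sorted2_perm path _ _ false).mem_iff).mpr hmem
  have hcount : ordered.count p = path.count p :=
    (PySem.List.sorted2_perm path _ _ false).count_eq p
  have hpw := pairwise_sorted2 path
  rw [← hord] at hpw
  match hc : ordered, hmemord, hcount, hpw with
  | [], hmemord, _, _ => exact absurd hmemord (by simp)
  | q :: rest, hmemord, hcount, hpw =>
      have hruns := giftsRuns_getD rest q 0 PySem.Dict.empty p hpw
      simp only [Function.comp_apply]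
      rw [hcounts, hruns, if_pos hmemord, hcount]
      by_cases hpq : p = q <;> simp [hpq]
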